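-- pv_equiv track=rewrite | github.com/zweifisch/fragment | fragment/fragment.py | split_by_headline
-- ===== SOURCE A (Python) =====
-- def split_by_headline(content):
-- 	headline = None
-- 	body = []
-- 	for line in content.splitlines():
-- 		if line[:2] == '# ':
-- 			if headline is not None:
-- 				yield (headline, "\n".join(body))
-- 			headline = line[2:]
-- 			body = []
-- 		else:
-- 			body.append(line)
-- 	yield (headline, "\n".join(body))
-- ===== SOURCE B (Python) =====
-- def split_at_headline(lines):
--     """Split lines into (prefix before first '# ' line, suffix from it)."""
--     for i, l in enumerate(lines):
--         if l[:2] == '# ':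
--             return lines[:i], lines[i:]
--     return lines, []
--
-- def split_by_headline(content):
--     pre, rest = split_at_headline(content.splitlines())
--     if not rest:
--         yield (None, "\n".join(pre))
--         return
--     while rest:
--         head = rest[0][2:]
--         body, rest = split_at_headline(rest[1:])
--         yield (head, "\n".join(body))
-- ===== Notes on version B (the rewrite author's own statement) =====
-- stated objective: alternative
-- what changed: B replaces A's single-pass accumulator (buffering a body list and a pending headline while scanning every line) with a boundary-splitting decomposition: a helper split_at_headline cuts the line list at the next headline line, and the main loop repeatedly slices off one whole section at a time.
import Mathlib
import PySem

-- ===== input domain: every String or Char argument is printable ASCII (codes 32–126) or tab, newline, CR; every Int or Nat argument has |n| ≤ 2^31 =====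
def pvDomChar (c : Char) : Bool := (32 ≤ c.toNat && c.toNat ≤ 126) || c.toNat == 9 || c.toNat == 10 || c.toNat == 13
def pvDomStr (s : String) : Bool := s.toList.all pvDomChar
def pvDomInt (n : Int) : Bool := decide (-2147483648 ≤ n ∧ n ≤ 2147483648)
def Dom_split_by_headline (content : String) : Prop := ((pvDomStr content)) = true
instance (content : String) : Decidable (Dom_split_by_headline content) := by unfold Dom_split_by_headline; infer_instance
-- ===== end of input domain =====

-- B restructures A's buffering scan into a boundary-splitting decomposition (objective: alternative).

-- ===== PORT A =====
-- loop body of A: state = (headline, body, yielded-so-far)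
def stepA (st : Option String × List String × List (Option String × String)) (line : String) :
    Option String × List String × List (Option String × String) :=
  if PySem.Str.slice line none (some 2) == "# " then
    (some (PySem.Str.slice line (some 2) none), [],
      match st.1 with
      | some h => st.2.2 ++ [(some h, PySem.Str.join "\n" st.2.1)]
      | none => st.2.2)
  else (st.1, st.2.1 ++ [line], st.2.2)

-- the final 'yield (headline, "\n".join(body))'
def finA (st : Option String × List String × List (Option String × String)) :
    List (Option String × String) :=
  st.2.2 ++ [(st.1, PySem.Str.join "\n" st.2.1)]

def split_by_headline (content : String) : List (Option String × String) :=
  finA ((PySem.Str.splitlines content).foldl stepA (none, [], []))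

-- ===== PORT B =====
-- Source B's split_at_headline: (lines before the first '# ' line, the rest from it)
def splitAtHeadlineB : List String → List String × List String
  | [] => ([], [])
  | l :: ls =>
    if PySem.Str.slice l none (some 2) == "# " then ([], l :: ls)
    else
      let p := splitAtHeadlineB ls
      (l :: p.1, p.2)

-- termination measure for sectionsB
theorem splitAtHeadlineB_len (ls : List String) : (splitAtHeadlineB ls).2.length ≤ ls.length := by
  induction ls with
  | nil => simp [splitAtHeadlineB]
  | cons l tl ih =>
    simp only [splitAtHeadlineB]
    split
    · simp
    · simpa using Nat.le_succ_of_le ih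

-- Source B's while loop: rest starts at a headline; emit one section per iteration
def sectionsB (rest : List String) : List (Option String × String) :=
  match rest with
  | [] => []
  | l :: tl =>
    (some (PySem.Str.slice l (some 2) none),
      PySem.Str.join "\n" (splitAtHeadlineB tl).1) :: sectionsB (splitAtHeadlineB tl).2
termination_by rest.length
decreasing_by exact Nat.lt_succ_of_le (splitAtHeadlineB_len tl)

def split_by_headline_alt (content : String) : List (Option String × String) :=
  let p := splitAtHeadlineB (PySem.Str.splitlines content)
  match p.2 with
  | [] => [(none, PySem.Str.join "\n" p.1)]
  | _ => sectionsB p.2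

-- ===== PRECONDITION & SPEC =====
def Spec_split_by_headline (content : String) (out : List (Option String × String)) : Prop := out = split_by_headline_alt content
instance (content : String) (out : List (Option String × String)) : Decidable (Spec_split_by_headline content out) := by unfold Spec_split_by_headline; infer_instance

-- ===== CLAIM (what is proved, stated in full; the proofs are below) =====
def Claim_equal_split_by_headline : Prop := ∀ (content : String), Dom_split_by_headline content → Spec_split_by_headline content (split_by_headline content)

-- ===== LEMMAS AND PROOFS =====

theorem splitAtHeadlineB_append (ls : List String) :
    (splitAtHeadlineB ls).1 ++ (splitAtHeadlineB ls).2 = ls := by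
  induction ls with
  | nil => simp [splitAtHeadlineB]
  | cons l tl ih =>
    simp only [splitAtHeadlineB]
    split
    · simp
    · simpa using ih

theorem inv_some (lines : List String) :
    ∀ (h : String) (body : List String) (out : List (Option String × String)),
      finA (lines.foldl stepA (some h, body, out))
        = out ++ (some h, PySem.Str.join "\n" (body ++ (splitAtHeadlineB lines).1))
            :: sectionsB (splitAtHeadlineB lines).2 := by
  induction lines with
  | nil => intro h body out; simp [finA, splitAtHeadlineB, sectionsB]
  | cons l tl ih =>
    intro h body out
    by_cases hl : PySem.Str.slice l none (some 2) == "# "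
    · simp only [List.foldl_cons, stepA, hl, if_pos, splitAtHeadlineB]
      rw [ih]
      simp [sectionsB]
    · simp only [List.foldl_cons, stepA, hl, splitAtHeadlineB, Bool.false_eq_true, if_false]
      rw [ih]
      simp

theorem inv_none (lines : List String) :
    ∀ (body : List String) (out : List (Option String × String)),
      finA (lines.foldl stepA (none, body, out))
        = out ++ (match (splitAtHeadlineB lines).2 with
            | [] => [(none, PySem.Str.join "\n" (body ++ lines))]
            | _ :: _ => sectionsB (splitAtHeadlineB lines).2) := by
  induction lines with
  | nil => intro body out; simp [finA, splitAtHeadlineB]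
  | cons l tl ih =>
    intro body out
    by_cases hl : PySem.Str.slice l none (some 2) == "# "
    · simp only [List.foldl_cons, stepA, hl, if_pos, splitAtHeadlineB]
      rw [inv_some]
      simp [sectionsB]
    · simp only [List.foldl_cons, stepA, hl, splitAtHeadlineB, Bool.false_eq_true, if_false]
      rw [ih]
      rcases hr : (splitAtHeadlineB tl).2 with _ | ⟨r, rs⟩ <;> simp

-- ===== VERDICT (by name: the statement is the Claim_ definition above) =====
theorem split_by_headline_spec : Claim_equal_split_by_headline := by
  intro content _
  unfold Spec_split_by_headline split_by_headline split_by_headline_alt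
  rw [inv_none]
  rcases hr : (splitAtHeadlineB (PySem.Str.splitlines content)).2 with _ | ⟨r, rs⟩
  · have h1 := splitAtHeadlineB_append (PySem.Str.splitlines content)
    rw [hr, List.append_nil] at h1
    simp [hr, h1]
  · simp [hr]
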